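-- pv_equiv track=rewrite | github.com/SangJunni/Algorithm | Silver/B27921_동전 퍼즐.py | min_moves_to_match
-- ===== SOURCE A (Python) =====
-- def min_moves_to_match(source_positions, target_positions):
--     min_moves = float('inf')
--     max_shift = 10  # From -10 to 10
--
--     # Iterate over all possible shifts (a, b)
--     for a in range(-max_shift, max_shift + 1):
--         for b in range(-max_shift, max_shift + 1):
--             shifted_target_positions = [(x + a, y + b) for x, y in target_positions]
--             # Check how many coins are misplaced
--             misplaced = 0
--             target_set = set(shifted_target_positions)
--             for s in source_positions:
--                 if s not in target_set:
--                     misplaced += 1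
--             min_moves = min(min_moves, misplaced)
--
--     return min_moves
-- ===== SOURCE B (Python) =====
-- def min_moves_to_match(source_positions, target_positions):
--     # Count source-minus-target difference vectors once, then scan the
--     # 21x21 shift window in the table.
--     targets = list(dict.fromkeys(target_positions))  # deduplicate, keep order
--     count = {}
--     for sx, sy in source_positions:
--         for tx, ty in targets:
--             d = (sx - tx, sy - ty)
--             count[d] = count.get(d, 0) + 1
--     best = 0
--     for a in range(-10, 11):
--         for b in range(-10, 11):
--             c = count.get((a, b), 0)
--             if c > best:
--                 best = c
--     return len(source_positions) - best
-- ===== Notes on version B (the rewrite author's own statement) =====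
-- stated objective: alternative
-- what changed: Instead of rebuilding and rescanning a shifted target set for each of the 441 shifts, B builds one table counting source-minus-target difference vectors (targets deduplicated once) and returns len(source) minus the maximum table entry over the 21x21 shift window.
import Mathlib
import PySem

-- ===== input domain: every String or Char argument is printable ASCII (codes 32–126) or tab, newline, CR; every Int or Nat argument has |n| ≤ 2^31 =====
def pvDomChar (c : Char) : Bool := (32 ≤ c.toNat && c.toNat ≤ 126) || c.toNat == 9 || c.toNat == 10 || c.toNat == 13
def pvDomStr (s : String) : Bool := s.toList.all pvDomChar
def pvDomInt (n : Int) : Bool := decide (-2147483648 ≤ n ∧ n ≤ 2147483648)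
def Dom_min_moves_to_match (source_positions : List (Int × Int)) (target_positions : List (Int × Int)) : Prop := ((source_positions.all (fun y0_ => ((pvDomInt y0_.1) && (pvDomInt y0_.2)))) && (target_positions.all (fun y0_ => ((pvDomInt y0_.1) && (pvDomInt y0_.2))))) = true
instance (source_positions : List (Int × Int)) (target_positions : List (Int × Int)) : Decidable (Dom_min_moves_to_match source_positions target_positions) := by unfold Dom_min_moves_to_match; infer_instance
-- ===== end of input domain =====

-- B replaces A's per-shift set-rebuild-and-rescan by one table of source−target
-- difference vectors and a single scan of the 21×21 shift window (objective: alternative).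


-- ===== PORT A =====
-- min(m, x) where m starts as float('inf'): none models inf, never returned
-- because the two ranges below are nonempty.
def pyMinInf (m : Option Int) (x : Int) : Option Int :=
  match m with
  | none => some x
  | some v => some (min v x)

def min_moves_to_match (source_positions : List (Int × Int)) (target_positions : List (Int × Int)) : Int :=
  -- range(-max_shift, max_shift + 1) with max_shift = 10, i.e. range(-10, 11)
  let min_moves :=
    (PySem.List.pyRange (-10) 11 1).foldl (fun mm a =>
      (PySem.List.pyRange (-10) 11 1).foldl (fun mm b =>
        let shifted_target_positions := target_positions.map (fun t => (t.1 + a, t.2 + b))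
        let target_set : PySem.Set (Int × Int) := PySem.Set.ofList shifted_target_positions
        let misplaced : Int := source_positions.foldl
          (fun mis s => if PySem.Set.contains target_set s then mis else mis + 1) 0
        pyMinInf mm misplaced) mm) none
  match min_moves with
  | some v => v
  | none => 0  -- unreachable: the shift window is nonempty, so min_moves is never inf here

-- ===== PORT B =====
def min_moves_to_match_alt (source_positions : List (Int × Int)) (target_positions : List (Int × Int)) : Int :=
  let targets := PySem.List.dedup target_positions
  let count : PySem.Dict (Int × Int) Int :=
    source_positions.foldl (fun d s =>
      targets.foldl (fun d t => d.modify (s.1 - t.1, s.2 - t.2) 0 (· + 1)) d)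
      PySem.Dict.empty
  let best : Int :=
    (PySem.List.pyRange (-10) 11 1).foldl (fun best a =>
      (PySem.List.pyRange (-10) 11 1).foldl (fun best b =>
        let c := count.getD (a, b) 0
        if c > best then c else best) best) 0
  (source_positions.length : Int) - best

-- ===== PRECONDITION & SPEC =====
def Spec_min_moves_to_match (source_positions : List (Int × Int)) (target_positions : List (Int × Int)) (out : Int) : Prop := out = min_moves_to_match_alt source_positions target_positions
instance (source_positions : List (Int × Int)) (target_positions : List (Int × Int)) (out : Int) : Decidable (Spec_min_moves_to_match source_positions target_positions out) := by unfold Spec_min_moves_to_match; infer_instance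

-- ===== CLAIM (what is proved, stated in full; the proofs are below) =====
def Claim_equal_min_moves_to_match : Prop := ∀ (source_positions : List (Int × Int)) (target_positions : List (Int × Int)), Dom_min_moves_to_match source_positions target_positions → Spec_min_moves_to_match source_positions target_positions (min_moves_to_match source_positions target_positions)

-- ===== LEMMAS AND PROOFS =====

-- number of sources matched by the shift p = (a, b)
def pvMatched : List (Int × Int) → List (Int × Int) → (Int × Int) → Int
  | [], _, _ => 0
  | s :: rest, tgt, p =>
      (if (s.1 - p.1, s.2 - p.2) ∈ PySem.List.dedup tgt then (1 : Int) else 0)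
        + pvMatched rest tgt p

theorem pvMatched_nonneg (src tgt : List (Int × Int)) (p : Int × Int) :
    0 ≤ pvMatched src tgt p := by
  induction src with
  | nil => simp [pvMatched]
  | cons s rest ih =>
      unfold pvMatched
      split_ifs <;> omega

-- the 21×21 shift window as a single list of pairs
def pvShifts : List (Int × Int) :=
  (PySem.List.pyRange (-10) 11 1).flatMap (fun a =>
    (PySem.List.pyRange (-10) 11 1).map (fun b => (a, b)))

-- B's difference-vector table counts the matched sources of each shift
theorem pvDict_getD (src targets : List (Int × Int)) (d : PySem.Dict (Int × Int) Int)
    (v : Int × Int) :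
    (src.foldl (fun d s =>
        targets.foldl (fun d t => d.modify (s.1 - t.1, s.2 - t.2) 0 (· + 1)) d) d).getD v 0
      = d.getD v 0
        + (src.map (fun s =>
            (((targets.map (fun t => (s.1 - t.1, s.2 - t.2))).count v : Int)))).sum := by
  induction src generalizing d with
  | nil => simp
  | cons s rest ih =>
      simp only [List.foldl_cons, List.map_cons, List.sum_cons, ih]
      have hinner : (targets.map (fun t : Int × Int => (s.1 - t.1, s.2 - t.2))).foldl
            (fun d x => PySem.Dict.modify d x 0 (· + 1)) d
          = targets.foldl (fun d t => d.modify (s.1 - t.1, s.2 - t.2) 0 (· + 1)) d :=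
        List.foldl_map
      rw [← hinner, PySem.Dict.getD_foldl_modify_add_one]
      ring

theorem pvDelta_injective (s : Int × Int) :
    Function.Injective (fun t : Int × Int => (s.1 - t.1, s.2 - t.2)) := by
  intro t u h
  simp only [Prod.mk.injEq] at h
  obtain ⟨h1, h2⟩ := h
  exact Prod.ext (by omega) (by omega)

-- over a deduplicated target list, each source contributes 1 to exactly the
-- shifts that match it
theorem pvCount_map_delta (targets : List (Int × Int)) (hnd : targets.Nodup)
    (s p : Int × Int) :
    ((targets.map (fun t => (s.1 - t.1, s.2 - t.2))).count p : Int)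
      = if (s.1 - p.1, s.2 - p.2) ∈ targets then 1 else 0 := by
  have hp : p = ((fun t : Int × Int => (s.1 - t.1, s.2 - t.2)) (s.1 - p.1, s.2 - p.2)) := by
    obtain ⟨p1, p2⟩ := p
    simp only [Prod.mk.injEq]
    omega
  rw [hp, List.count_map_of_injective _ _ (pvDelta_injective s)]
  by_cases hm : (s.1 - p.1, s.2 - p.2) ∈ targets
  · rw [List.count_eq_one_of_mem hnd hm]; simp [hm]
  · rw [List.count_eq_zero_of_not_mem hm]; simp [hm]

theorem pvSum_eq_matched (tgt : List (Int × Int)) (p : Int × Int) :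
    ∀ src : List (Int × Int),
    (src.map (fun s =>
        if (s.1 - p.1, s.2 - p.2) ∈ PySem.List.dedup tgt then (1 : Int) else 0)).sum
      = pvMatched src tgt p := by
  intro src
  induction src with
  | nil => simp [pvMatched]
  | cons s rest ih =>
      simp only [List.map_cons, List.sum_cons, ih]
      rfl

theorem pvDict_getD_eq_matched (src tgt : List (Int × Int)) (p : Int × Int) :
    (src.foldl (fun d s =>
        (PySem.List.dedup tgt).foldl
          (fun d t => d.modify (s.1 - t.1, s.2 - t.2) 0 (· + 1)) d)
        PySem.Dict.empty).getD p 0 = pvMatched src tgt p := by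
  rw [pvDict_getD]
  have hnd : (PySem.List.dedup tgt).Nodup := PySem.List.nodup_dedup tgt
  simp only [PySem.Dict.getD_empty, zero_add]
  rw [List.map_congr_left (fun s _ => pvCount_map_delta _ hnd s p)]
  exact pvSum_eq_matched tgt p src

-- A's per-shift misplaced count is |src| minus the matched count
theorem pvMisplaced_core (tgt : List (Int × Int)) (a b : Int) :
    ∀ (src : List (Int × Int)) (acc : Int),
    src.foldl (fun mis s =>
        if PySem.Set.contains
            (PySem.Set.ofList (tgt.map (fun t => (t.1 + a, t.2 + b)))) s
          then mis else mis + 1) acc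
      = acc + ((src.length : Int) - pvMatched src tgt (a, b)) := by
  intro src
  induction src with
  | nil => intro acc; simp [pvMatched]
  | cons s rest ih =>
      intro acc
      simp only [List.foldl_cons]
      have hmem : PySem.Set.contains
          (PySem.Set.ofList (tgt.map (fun t => (t.1 + a, t.2 + b)))) s = true
          ↔ (s.1 - a, s.2 - b) ∈ PySem.List.dedup tgt := by
        rw [PySem.Set.contains_iff, PySem.Set.mem_ofList, PySem.List.mem_dedup, List.mem_map]
        constructor
        · rintro ⟨⟨t1, t2⟩, ht, hst⟩
          have h1 : t1 + a = s.1 := congrArg Prod.fst hst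
          have h2 : t2 + b = s.2 := congrArg Prod.snd hst
          have he : (s.1 - a, s.2 - b) = (t1, t2) := by
            simp only [Prod.mk.injEq]; omega
          rw [he]; exact ht
        · intro h
          refine ⟨(s.1 - a, s.2 - b), h, ?_⟩
          obtain ⟨s1, s2⟩ := s
          simp only [Prod.mk.injEq]
          omega
      by_cases hb : PySem.Set.contains
          (PySem.Set.ofList (tgt.map (fun t => (t.1 + a, t.2 + b)))) s = true
      · rw [if_pos hb, ih]
        have h := hmem.mp hb
        have hm : pvMatched (s :: rest) tgt (a, b) = 1 + pvMatched rest tgt (a, b) := by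
          rw [show pvMatched (s :: rest) tgt (a, b)
                = (if (s.1 - a, s.2 - b) ∈ PySem.List.dedup tgt then (1 : Int) else 0)
                  + pvMatched rest tgt (a, b) from rfl, if_pos h]
        rw [hm]
        simp only [List.length_cons]
        push_cast
        omega
      · rw [if_neg hb, ih]
        have h : ¬ (s.1 - a, s.2 - b) ∈ PySem.List.dedup tgt := fun hh => hb (hmem.mpr hh)
        have hm : pvMatched (s :: rest) tgt (a, b) = pvMatched rest tgt (a, b) := by
          rw [show pvMatched (s :: rest) tgt (a, b)
                = (if (s.1 - a, s.2 - b) ∈ PySem.List.dedup tgt then (1 : Int) else 0)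
                  + pvMatched rest tgt (a, b) from rfl, if_neg h]
          omega
        rw [hm]
        simp only [List.length_cons]
        push_cast
        omega

theorem pvMisplaced_eq (src tgt : List (Int × Int)) (a b : Int) :
    (src.foldl (fun mis s =>
        if PySem.Set.contains
            (PySem.Set.ofList (tgt.map (fun t => (t.1 + a, t.2 + b)))) s
          then mis else mis + 1) (0 : Int))
      = (src.length : Int) - pvMatched src tgt (a, b) := by
  rw [pvMisplaced_core tgt a b src 0]
  omega

-- the min-loop over a nonempty list of shifts, versus the running-max loop
theorem pvFoldMin_eq {α : Type} (f : α → Int) (n : Int) (xs : List α) : ∀ (b : Int),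
    xs.foldl (fun mm x => pyMinInf mm (n - f x)) (some (n - b))
      = some (n - xs.foldl (fun b x => if f x > b then f x else b) b) := by
  induction xs with
  | nil => intro b; simp
  | cons x t ih =>
      intro b
      simp only [List.foldl_cons]
      rw [show pyMinInf (some (n - b)) (n - f x) = some (min (n - b) (n - f x)) from rfl]
      have h1 : min (n - b) (n - f x) = n - (if f x > b then f x else b) := by
        split_ifs <;> omega
      rw [h1, ih]

theorem pvFoldMin_main {α : Type} (f : α → Int) (hf : ∀ x, 0 ≤ f x) (n : Int)
    (xs : List α) (hne : xs ≠ []) :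
    xs.foldl (fun mm x => pyMinInf mm (n - f x)) none
      = some (n - xs.foldl (fun b x => if f x > b then f x else b) 0) := by
  cases xs with
  | nil => exact absurd rfl hne
  | cons x t =>
      simp only [List.foldl_cons]
      rw [show pyMinInf none (n - f x) = some (n - f x) from rfl]
      have h0 : (if f x > (0 : Int) then f x else 0) = f x := by
        have := hf x; split_ifs <;> omega
      rw [h0, pvFoldMin_eq]

theorem pvShifts_ne_nil : pvShifts ≠ [] := by
  intro h
  have hm : ((-10 : Int), (-10 : Int)) ∈ pvShifts := by
    rw [pvShifts]
    refine List.mem_flatMap.mpr ⟨-10, ?_, ?_⟩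
    · rw [PySem.List.mem_pyRange_one]; omega
    · exact List.mem_map.mpr ⟨-10, by rw [PySem.List.mem_pyRange_one]; omega, rfl⟩
  rw [h] at hm
  exact List.not_mem_nil hm

-- ===== VERDICT (by name: the statement is the Claim_ definition above) =====
set_option maxRecDepth 8192 in
set_option maxHeartbeats 2000000 in
theorem min_moves_to_match_spec : Claim_equal_min_moves_to_match := by
  intro src tgt _
  have hA0 : pvShifts.foldl
        (fun mm p => pyMinInf mm ((src.length : Int) - pvMatched src tgt p)) none
      = (PySem.List.pyRange (-10) 11 1).foldl (fun mm a =>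
          (PySem.List.pyRange (-10) 11 1).foldl (fun mm b =>
            pyMinInf mm (src.foldl (fun mis s =>
              if PySem.Set.contains
                  (PySem.Set.ofList (tgt.map (fun t => (t.1 + a, t.2 + b)))) s
                then mis else mis + 1) 0)) mm) none := by
    rw [pvShifts, List.foldl_flatMap]
    apply PySem.List.foldl_congr_mem
    intro acc a _
    have h2 : ((PySem.List.pyRange (-10) 11 1).map (fun b => (a, b))).foldl
          (fun mm p => pyMinInf mm ((src.length : Int) - pvMatched src tgt p)) acc
        = (PySem.List.pyRange (-10) 11 1).foldl
          (fun mm b => pyMinInf mm ((src.length : Int) - pvMatched src tgt (a, b))) acc :=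
      List.foldl_map
    rw [h2]
    apply PySem.List.foldl_congr_mem
    intro mm b _
    rw [pvMisplaced_eq]
  have hB0 : pvShifts.foldl
        (fun best p => if pvMatched src tgt p > best then pvMatched src tgt p else best) (0 : Int)
      = (PySem.List.pyRange (-10) 11 1).foldl (fun best a =>
          (PySem.List.pyRange (-10) 11 1).foldl (fun best b =>
            if (src.foldl (fun d s =>
                  (PySem.List.dedup tgt).foldl
                    (fun d t => d.modify (s.1 - t.1, s.2 - t.2) 0 (· + 1)) d)
                  PySem.Dict.empty).getD (a, b) 0 > best
              then (src.foldl (fun d s =>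
                  (PySem.List.dedup tgt).foldl
                    (fun d t => d.modify (s.1 - t.1, s.2 - t.2) 0 (· + 1)) d)
                  PySem.Dict.empty).getD (a, b) 0
              else best) best) (0 : Int) := by
    rw [pvShifts, List.foldl_flatMap]
    apply PySem.List.foldl_congr_mem
    intro acc a _
    have h2 : ((PySem.List.pyRange (-10) 11 1).map (fun b => (a, b))).foldl
          (fun best p => if pvMatched src tgt p > best then pvMatched src tgt p else best) acc
        = (PySem.List.pyRange (-10) 11 1).foldl
          (fun best b => if pvMatched src tgt (a, b) > best then pvMatched src tgt (a, b) else best) acc :=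
      List.foldl_map
    rw [h2]
    apply PySem.List.foldl_congr_mem
    intro best b _
    rw [pvDict_getD_eq_matched]
  have hmin := pvFoldMin_main (pvMatched src tgt) (pvMatched_nonneg src tgt)
    (src.length : Int) pvShifts pvShifts_ne_nil
  have lemA : min_moves_to_match src tgt
      = (src.length : Int) - pvShifts.foldl
          (fun best p => if pvMatched src tgt p > best then pvMatched src tgt p else best) 0 := by
    unfold min_moves_to_match
    simp only []
    rw [← hA0, hmin]
  have lemB : min_moves_to_match_alt src tgt
      = (src.length : Int) - pvShifts.foldl
          (fun best p => if pvMatched src tgt p > best then pvMatched src tgt p else best) 0 := by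
    unfold min_moves_to_match_alt
    simp only []
    rw [← hB0]
  unfold Spec_min_moves_to_match
  rw [lemA, lemB]
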